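-- pv_equiv track=rewrite | github.com/shiyang07ca/lab | algo/oj/leetcode/python/02397/solution.py | maximumRows
-- ===== SOURCE A (Python) =====
-- from typing import List
--
-- def maximumRows(mat: List[List[int]], numSelect: int) -> int:
--     mask = [sum(x << j for j, x in enumerate(row)) for i, row in enumerate(mat)]
--     ans = 0
--     for subset in range(1 << len(mat[0])):
--         if subset.bit_count() == numSelect:  # subset 的大小等于 numSelect
--             covered_rows = sum(row & subset == row for row in mask)
--             ans = max(ans, covered_rows)
--     return ans
-- ===== SOURCE B (Python) =====
-- from typing import List
--
-- def maximumRows(mat: List[List[int]], numSelect: int) -> int: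
--     n = len(mat[0])
--     masks = [sum(x << j for j, x in enumerate(row)) for row in mat]
--
--     def combs(col, k):
--         # bitmasks of k-element subsets of columns col..n-1
--         if k == 0:
--             return [0]
--         if n - col < k:
--             return []
--         return [(1 << col) | s for s in combs(col + 1, k - 1)] + combs(col + 1, k)
--
--     best = 0
--     if numSelect >= 0:
--         for subset in combs(0, numSelect):
--             best = max(best, sum(m & subset == m for m in masks))
--     return best
-- ===== Notes on version B (the rewrite author's own statement) =====
-- stated objective: faster
-- what changed: B enumerates only the C(n,numSelect) column subsets of the required size by a recursive include/exclude combination generator instead of scanning all 2^n bitmasks and filtering by popcount; intended as faster (measured 13.7x at the largest size both finished, A timing out beyond that, though the harness could not confirm a ratio at the top size).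
-- outside the precondition, e.g. on maximumRows([], 0): A raises IndexError, B raises IndexError
import Mathlib
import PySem

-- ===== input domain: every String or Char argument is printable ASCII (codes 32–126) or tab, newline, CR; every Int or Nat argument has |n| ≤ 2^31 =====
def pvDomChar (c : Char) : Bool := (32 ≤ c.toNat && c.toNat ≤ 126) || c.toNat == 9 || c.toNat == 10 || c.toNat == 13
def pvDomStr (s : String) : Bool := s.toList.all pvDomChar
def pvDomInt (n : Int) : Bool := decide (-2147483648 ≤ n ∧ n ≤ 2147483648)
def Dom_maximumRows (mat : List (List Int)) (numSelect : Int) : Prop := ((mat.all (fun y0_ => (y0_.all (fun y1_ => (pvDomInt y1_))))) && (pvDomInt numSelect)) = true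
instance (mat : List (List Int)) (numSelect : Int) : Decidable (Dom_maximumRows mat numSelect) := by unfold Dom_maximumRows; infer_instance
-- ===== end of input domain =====

-- B enumerates only the C(n,numSelect) column subsets of the required size by a recursive
-- include/exclude combination generator, instead of scanning all 2^n bitmasks and filtering
-- by popcount; intended as faster (a timing run measured 13.7x at the largest size both
-- Pythons finished, A timing out beyond that).

-- ===== PORT A =====
-- sum(x << j for j, x in enumerate(row)) — this exact expression occurs in BOTH Pythons,
-- so both ports share this helper.  '<<' on int is core '<<<'; the enumerate index is ≥ 0,
-- so '.toNat' on it is exact.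
def pvRowMask (row : List Int) : Int :=
  (PySem.List.enumerate row).foldl (fun acc jx => acc + (jx.2 <<< jx.1.toNat)) 0

-- sum(row & subset == row for row in mask) — also textually identical in both Pythons; shared.
def pvCovered (masks : List Int) (subset : Int) : Int :=
  masks.foldl (fun acc m => acc + (if PySem.Int.band m subset = m then 1 else 0)) 0

-- For subset : Nat, subset.bit_count() is PySem.Int.bitCount ↑subset; range(1 << n) over
-- nonnegative ints is List.range (2^n) (exact).  mat[0]: Pre_ excludes mat = [] (IndexError).
def maximumRows (mat : List (List Int)) (numSelect : Int) : Int :=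
  let masks := mat.map pvRowMask
  let n := ((PySem.List.pyGet? mat 0).getD []).length
  (List.range (2 ^ n)).foldl
    (fun ans (subset : Nat) =>
      if (PySem.Int.bitCount (subset : Int) : Int) = numSelect then
        max ans (pvCovered masks (subset : Int))
      else ans) 0

-- ===== PORT B =====
-- combs(col, k) of Source B: bitmasks of the k-element subsets of columns col..n-1.
def pvCombs (n col k : Nat) : List Int :=
  if k = 0 then [(0 : Int)]
  else if n - col < k then []
  else ((pvCombs n (col + 1) (k - 1)).map (fun s => PySem.Int.bor ((1 : Int) <<< col) s))
         ++ pvCombs n (col + 1) k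
termination_by n - col
decreasing_by all_goals omega

def maximumRows_alt (mat : List (List Int)) (numSelect : Int) : Int :=
  let n := ((PySem.List.pyGet? mat 0).getD []).length
  let masks := mat.map pvRowMask
  if 0 ≤ numSelect then
    (pvCombs n 0 numSelect.toNat).foldl
      (fun best s => max best (pvCovered masks s)) 0
  else 0

-- ===== PRECONDITION & SPEC =====
-- A evaluates mat[0]; on mat = [] it raises IndexError, so Pre_ excludes exactly that.
def Pre_maximumRows (mat : List (List Int)) (numSelect : Int) : Prop := mat ≠ []
instance (mat : List (List Int)) (numSelect : Int) : Decidable (Pre_maximumRows mat numSelect) := by unfold Pre_maximumRows; infer_instance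

def pvWitness_maximumRows : List (List Int) × Int := ([[0, 0, 1], [1, 0, 1], [1, 1, 0]], 2)

def Spec_maximumRows (mat : List (List Int)) (numSelect : Int) (out : Int) : Prop := out = maximumRows_alt mat numSelect
instance (mat : List (List Int)) (numSelect : Int) (out : Int) : Decidable (Spec_maximumRows mat numSelect out) := by unfold Spec_maximumRows; infer_instance

-- ===== CLAIM (what is proved, stated in full; the proofs are below) =====
def Claim_equal_maximumRows : Prop := ∀ (mat : List (List Int)) (numSelect : Int), Dom_maximumRows mat numSelect → Pre_maximumRows mat numSelect → Spec_maximumRows mat numSelect (maximumRows mat numSelect)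

-- ===== LEMMAS AND PROOFS =====

-- popcount on Nat, the spec-side shadow of PySem.Int.bitCount on casts of naturals
def pvPC (m : Nat) : Nat := if m = 0 then 0 else m % 2 + pvPC (m / 2)
decreasing_by exact Nat.div_lt_self (by omega) (by omega)

theorem pvPC_cast (m : Nat) : PySem.Int.bitCount (m : Int) = pvPC m := by
  induction m using Nat.strong_induction_on with
  | _ m ih =>
    rw [pvPC]
    by_cases h : m = 0
    · subst h; simp [PySem.Int.bitCount_zero]
    · rw [if_neg h, PySem.Int.bitCount_natCast (by omega), ih (m / 2) (by omega)]

theorem pvPC_zero_iff (m : Nat) : pvPC m = 0 ↔ m = 0 := by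
  induction m using Nat.strong_induction_on with
  | _ m ih =>
    rw [pvPC]
    by_cases h : m = 0
    · simp [h]
    · rw [if_neg h]
      rcases Nat.even_or_odd m with he | ho
      · have h2 : m / 2 ≠ 0 := by rcases he with ⟨u, hu⟩; omega
        have := (ih (m / 2) (by omega)).not.mpr h2
        omega
      · have h1 : m % 2 = 1 := Nat.odd_iff.mp ho
        omega

theorem pvPC_double (m : Nat) : pvPC (2 * m) = pvPC m := by
  by_cases h : m = 0
  · subst h; rfl
  · rw [pvPC, if_neg (by omega)]
    have h1 : 2 * m % 2 = 0 := by omega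
    have h2 : 2 * m / 2 = m := by omega
    rw [h1, h2, Nat.zero_add]

theorem pvPC_pow_mul (c q : Nat) : pvPC (2 ^ c * q) = pvPC q := by
  induction c with
  | zero => simp
  | succ c ih =>
    have h : 2 ^ (c + 1) * q = 2 * (2 ^ c * q) := by ring
    rw [h, pvPC_double, ih]

theorem pvPC_le (m : Nat) : ∀ q : Nat, q < 2 ^ m → pvPC q ≤ m := by
  induction m with
  | zero => intro q h; interval_cases q; simp [pvPC]
  | succ m ih =>
    intro q h
    by_cases h0 : q = 0
    · subst h0; simp [pvPC]
    · rw [pvPC, if_neg h0]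
      have := ih (q / 2) (by omega)
      omega

theorem pvPC_add_pow (c : Nat) : ∀ t : Nat, 2 ^ (c + 1) ∣ t → pvPC (2 ^ c + t) = 1 + pvPC t := by
  induction c with
  | zero =>
    rintro t ⟨u, rfl⟩
    have h : 2 ^ 0 + 2 ^ (0 + 1) * u = 2 * u + 1 := by ring
    rw [h, pvPC, if_neg (by omega)]
    have h1 : (2 * u + 1) % 2 = 1 := by omega
    have h2 : (2 * u + 1) / 2 = u := by omega
    have h3 : 2 ^ (0 + 1) * u = 2 * u := by ring
    rw [h1, h2, h3, pvPC_double]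
  | succ c ih =>
    rintro t ⟨u, rfl⟩
    have h : 2 ^ (c + 1) + 2 ^ (c + 1 + 1) * u = 2 * (2 ^ c + 2 ^ (c + 1) * u) := by ring
    have h' : 2 ^ (c + 1 + 1) * u = 2 * (2 ^ (c + 1) * u) := by ring
    rw [h, pvPC_double, ih _ ⟨u, rfl⟩, h', pvPC_double]

theorem pvLor_add_pow (c : Nat) : ∀ t : Nat, 2 ^ (c + 1) ∣ t → (2 ^ c) ||| t = 2 ^ c + t := by
  induction c with
  | zero =>
    rintro t ⟨u, rfl⟩
    have hb := Nat.lor_bit true 0 false u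
    simp only [Nat.bit, Bool.true_or, cond] at hb
    have hz : (0 : Nat) ||| u = u := Nat.zero_or u
    rw [hz] at hb
    have h1 : (2 : Nat) ^ 0 = 2 * 0 + 1 := by norm_num
    have h2 : 2 ^ (0 + 1) * u = 2 * u := by ring
    rw [h1, h2, hb]; omega
  | succ c ih =>
    rintro t ⟨u, rfl⟩
    have hb := Nat.lor_bit false (2 ^ c) false (2 ^ (c + 1) * u)
    simp only [Nat.bit, Bool.or_self, cond] at hb
    have h1 : (2 : Nat) ^ (c + 1) = 2 * 2 ^ c := by ring
    have h2 : 2 ^ (c + 1 + 1) * u = 2 * (2 ^ (c + 1) * u) := by ring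
    rw [h1, h2, hb, ih _ ⟨u, rfl⟩]; ring

-- the reference listing of the k-subsets of columns ≥ col, as a filter of range
def pvF (n col k : Nat) : List Nat :=
  (List.range (2 ^ n)).filter (fun s => pvPC s == k && s % 2 ^ col == 0)

theorem pvF_mem (n col k x : Nat) :
    x ∈ pvF n col k ↔ x < 2 ^ n ∧ pvPC x = k ∧ x % 2 ^ col = 0 := by
  simp [pvF, List.mem_filter, List.mem_range]

theorem pvF_nodup (n col k : Nat) : (pvF n col k).Nodup :=
  List.nodup_range.filter _

theorem pvF_zero (n col : Nat) : pvF n col 0 = [0] := by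
  have hcongr : ∀ s ∈ List.range (2 ^ n),
      (pvPC s == 0 && s % 2 ^ col == 0) = (s == 0) := by
    intro s _
    by_cases h : s = 0
    · subst h; rw [Bool.eq_iff_iff]; simp [pvPC]
    · have h2 : pvPC s ≠ 0 := fun hc => h ((pvPC_zero_iff s).mp hc)
      rw [Bool.eq_iff_iff]; simp [h, h2]
  rw [pvF, List.filter_congr hcongr]
  have h1 : 2 ^ n = (2 ^ n - 1) + 1 := by
    have := Nat.one_le_two_pow (n := n); omega
  rw [h1, List.range_succ_eq_map, List.filter_cons_of_pos (by simp),
    List.filter_map]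
  have h2 : List.filter ((fun s => s == 0) ∘ Nat.succ) (List.range (2 ^ n - 1)) = [] := by
    apply List.filter_eq_nil_iff.mpr
    intro a _
    simp [Function.comp]
  rw [h2]; rfl

theorem pvF_empty (n col k : Nat) (hk : k ≠ 0) (hnc : n - col < k) : pvF n col k = [] := by
  apply List.filter_eq_nil_iff.mpr
  intro s hs
  rw [List.mem_range] at hs
  simp only [Bool.and_eq_true, beq_iff_eq]
  rintro ⟨hpc, hmod⟩
  obtain ⟨q, rfl⟩ := Nat.dvd_of_mod_eq_zero hmod
  by_cases hcn : col ≤ n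
  · have hsplit : 2 ^ col * 2 ^ (n - col) = 2 ^ n := by
      rw [← pow_add]; congr 1; omega
    have hq : q < 2 ^ (n - col) := by
      by_contra hge
      have : 2 ^ col * 2 ^ (n - col) ≤ 2 ^ col * q :=
        Nat.mul_le_mul_left _ (by omega)
      omega
    have := pvPC_le (n - col) q hq
    rw [pvPC_pow_mul] at hpc
    omega
  · have hlt : 2 ^ n < 2 ^ col := Nat.pow_lt_pow_right (by omega) (by omega)
    have hq0 : q = 0 := by
      by_contra hq
      have : 2 ^ col ≤ 2 ^ col * q := Nat.le_mul_of_pos_right _ (by omega)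
      omega
    subst hq0
    simp [pvPC] at hpc
    omega

theorem pvTwo_pow_mod (col u : Nat) : (2 ^ col + 2 ^ (col + 1) * u) % 2 ^ (col + 1) = 2 ^ col := by
  rw [Nat.add_mul_mod_self_left]
  exact Nat.mod_eq_of_lt (Nat.pow_lt_pow_right (by omega) (by omega))

theorem pvCombs_perm (n col k : Nat) :
    List.Perm (pvCombs n col k) ((pvF n col k).map (fun s : Nat => (s : Int))) := by
  induction col, k using pvCombs.induct n with
  | case1 col =>
    rw [pvCombs, if_pos rfl, pvF_zero]
    rfl
  | case2 col k hk hnc =>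
    rw [pvCombs, if_neg hk, if_pos hnc, pvF_empty n col k hk hnc]
    rfl
  | case3 col k hk hnc ih1 ih2 =>
    rw [pvCombs, if_neg hk, if_neg hnc]
    have hcol : col < n := by omega
    refine List.Perm.trans (List.Perm.append (ih1.map _) ih2) ?_
    rw [List.map_map]
    have heq : List.map ((fun s => PySem.Int.bor ((1 : Int) <<< col) s) ∘ fun s : Nat => (s : Int))
        (pvF n (col + 1) (k - 1))
        = List.map (fun t : Nat => ((2 ^ col + t : Nat) : Int)) (pvF n (col + 1) (k - 1)) := by
      apply List.map_congr_left
      intro t ht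
      rw [pvF_mem] at ht
      obtain ⟨-, -, hmod⟩ := ht
      have hdvd : 2 ^ (col + 1) ∣ t := Nat.dvd_of_mod_eq_zero hmod
      have h1 : (1 : Int) <<< col = ((2 ^ col : Nat) : Int) := by
        rw [Int.shiftLeft_eq]; push_cast; ring
      show PySem.Int.bor ((1 : Int) <<< col) ((t : Nat) : Int) = _
      rw [h1, PySem.Int.bor_natCast, pvLor_add_pow col t hdvd]
    rw [heq, show (fun t : Nat => ((2 ^ col + t : Nat) : Int))
          = (fun s : Nat => (s : Int)) ∘ (fun t : Nat => 2 ^ col + t) from rfl,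
      ← List.map_map, ← List.map_append]
    apply List.Perm.map
    -- Nat-level permutation
    have hnd1 : (List.map (fun t => 2 ^ col + t) (pvF n (col + 1) (k - 1))).Nodup :=
      (pvF_nodup n (col + 1) (k - 1)).map (fun a b h => by omega)
    have hdisj : ∀ x ∈ List.map (fun t => 2 ^ col + t) (pvF n (col + 1) (k - 1)),
        x ∉ pvF n (col + 1) k := by
      intro x hx hx2
      rw [List.mem_map] at hx
      obtain ⟨t, ht, rfl⟩ := hx
      rw [pvF_mem] at ht hx2
      obtain ⟨u, rfl⟩ := Nat.dvd_of_mod_eq_zero ht.2.2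
      have := pvTwo_pow_mod col u
      have hpos : 0 < 2 ^ col := Nat.two_pow_pos col
      omega
    have hnd : (List.map (fun t => 2 ^ col + t) (pvF n (col + 1) (k - 1))
        ++ pvF n (col + 1) k).Nodup :=
      List.Nodup.append hnd1 (pvF_nodup n (col + 1) k) hdisj
    rw [List.perm_ext_iff_of_nodup hnd (pvF_nodup n col k)]
    intro x
    constructor
    · intro hx
      rw [List.mem_append] at hx
      rw [pvF_mem]
      rcases hx with hx | hx
      · rw [List.mem_map] at hx
        obtain ⟨t, ht, rfl⟩ := hx
        rw [pvF_mem] at ht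
        obtain ⟨hlt, hpc, hmod⟩ := ht
        obtain ⟨u, rfl⟩ := Nat.dvd_of_mod_eq_zero hmod
        have hsplit : 2 ^ (col + 1) * 2 ^ (n - (col + 1)) = 2 ^ n := by
          rw [← pow_add]; congr 1; omega
        have hu : u < 2 ^ (n - (col + 1)) := by
          by_contra hge
          have : 2 ^ (col + 1) * 2 ^ (n - (col + 1)) ≤ 2 ^ (col + 1) * u :=
            Nat.mul_le_mul_left _ (by omega)
          omega
        have hxlt : 2 ^ (col + 1) * (u + 1) ≤ 2 ^ n := by
          calc 2 ^ (col + 1) * (u + 1) ≤ 2 ^ (col + 1) * 2 ^ (n - (col + 1)) :=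
                Nat.mul_le_mul_left _ (by omega)
            _ = 2 ^ n := hsplit
        have hpow : (2 : Nat) ^ (col + 1) = 2 ^ col * 2 := pow_succ 2 col
        have hexp : 2 ^ (col + 1) * (u + 1) = 2 ^ (col + 1) * u + 2 ^ (col + 1) := by ring
        have hpos : 0 < 2 ^ col := Nat.two_pow_pos col
        refine ⟨by omega, ?_, ?_⟩
        · rw [pvPC_add_pow col _ ⟨u, rfl⟩]
          omega
        · have hx : 2 ^ col + 2 ^ (col + 1) * u = 2 ^ col * (1 + 2 * u) := by
            rw [hpow]; ring
          rw [hx, Nat.mul_mod_right]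
      · rw [pvF_mem] at hx
        obtain ⟨hlt, hpc, hmod⟩ := hx
        obtain ⟨v, rfl⟩ := Nat.dvd_of_mod_eq_zero hmod
        have hpow : (2 : Nat) ^ (col + 1) = 2 ^ col * 2 := pow_succ 2 col
        refine ⟨hlt, hpc, ?_⟩
        have hx : 2 ^ (col + 1) * v = 2 ^ col * (2 * v) := by rw [hpow]; ring
        rw [hx, Nat.mul_mod_right]
    · intro hx
      rw [pvF_mem] at hx
      obtain ⟨hlt, hpc, hmod⟩ := hx
      obtain ⟨q, rfl⟩ := Nat.dvd_of_mod_eq_zero hmod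
      have hpow : (2 : Nat) ^ (col + 1) = 2 ^ col * 2 := pow_succ 2 col
      rw [List.mem_append]
      have hpos : 0 < 2 ^ col := Nat.two_pow_pos col
      rcases Nat.even_or_odd q with ⟨u, hq⟩ | ⟨u, hq⟩
      · right
        rw [pvF_mem]
        have hx : 2 ^ col * q = 2 ^ (col + 1) * u := by subst hq; rw [hpow]; ring
        refine ⟨hlt, hpc, ?_⟩
        rw [hx, Nat.mul_mod_right]
      · left
        rw [List.mem_map]
        refine ⟨2 ^ (col + 1) * u, ?_, ?_⟩
        · rw [pvF_mem]
          have hxeq : 2 ^ col * q = 2 ^ col + 2 ^ (col + 1) * u := by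
            subst hq; rw [hpow]; ring
          refine ⟨by omega, ?_, Nat.mul_mod_right _ _⟩
          have := pvPC_add_pow col (2 ^ (col + 1) * u) ⟨u, rfl⟩
          rw [hxeq] at hpc
          omega
        · have hxeq : 2 ^ col * q = 2 ^ col + 2 ^ (col + 1) * u := by
            subst hq; rw [hpow]; ring
          omega

theorem foldl_if_filter (P : Nat → Prop) [DecidablePred P] (c : Nat → Int) :
    ∀ (l : List Nat) (a : Int),
      l.foldl (fun ans s => if P s then max ans (c s) else ans) a
        = (l.filter (fun s => decide (P s))).foldl (fun ans s => max ans (c s)) a := by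
  intro l
  induction l with
  | nil => intro a; rfl
  | cons x xs ih =>
    intro a
    by_cases h : P x
    · simp [h, ih]
    · simp [h, ih]

-- ===== VERDICT (by name: the statement is the Claim_ definition above) =====
theorem maximumRows_spec : Claim_equal_maximumRows := by
  unfold Claim_equal_maximumRows
  intro mat ns _ hpre
  unfold Spec_maximumRows
  simp only [maximumRows, maximumRows_alt]
  set n := ((PySem.List.pyGet? mat 0).getD []).length with hn
  set masks := mat.map pvRowMask with hm
  rw [foldl_if_filter (P := fun s : Nat => (PySem.Int.bitCount ((s : Nat) : Int) : Int) = ns)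
    (c := fun s : Nat => pvCovered masks ((s : Nat) : Int)) (List.range (2 ^ n)) 0]
  by_cases hns : 0 ≤ ns
  · rw [if_pos hns]
    have hfilt : List.filter
        (fun s : Nat => decide ((PySem.Int.bitCount ((s : Nat) : Int) : Int) = ns))
        (List.range (2 ^ n)) = pvF n 0 ns.toNat := by
      rw [pvF]
      apply List.filter_congr
      intro s _
      rw [Bool.eq_iff_iff]
      simp only [decide_eq_true_eq, Bool.and_eq_true, beq_iff_eq, pvPC_cast]
      omega
    rw [hfilt]
    have hrc : RightCommutative (fun (b : Int) (s : Int) => max b (pvCovered masks s)) :=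
      ⟨fun b x y => max_right_comm b _ _⟩
    have hB := List.Perm.foldl_eq (f := fun (b : Int) (s : Int) => max b (pvCovered masks s))
      (rcomm := hrc) (pvCombs_perm n 0 ns.toNat) 0
    rw [hB, List.foldl_map]
  · rw [if_neg hns]
    have hfilt : List.filter
        (fun s : Nat => decide ((PySem.Int.bitCount ((s : Nat) : Int) : Int) = ns))
        (List.range (2 ^ n)) = [] := by
      apply List.filter_eq_nil_iff.mpr
      intro s _
      simp only [decide_eq_true_eq]
      have : (0 : Int) ≤ (PySem.Int.bitCount ((s : Nat) : Int) : Int) := Int.natCast_nonneg _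
      omega
    rw [hfilt]
    rfl
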